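-- pv_equiv track=rewrite | github.com/ZEGOCLOUD/docs_all | rename_to_lower.py | convert_path_to_lowercase
-- ===== SOURCE A (Python) =====
-- def convert_path_to_lowercase(path):
--     """将路径转换为小写并用连字符替换空格"""
--     # 分割路径为各个部分
--     parts = path.split('/')
--     converted_parts = []
--
--     for part in parts:
--         if part in ['.', '..', '']:
--             # 保持相对路径标识符不变
--             converted_parts.append(part)
--         else:
--             # 转换文件名/目录名：小写 + 空格替换为连字符
--             converted_part = part.lower().replace(' ', '-')
--             # 处理 URL 编码的空格 (%20)
--             converted_part = converted_part.replace('%20', '-')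
--             converted_parts.append(converted_part)
--
--     return '/'.join(converted_parts)
-- ===== SOURCE B (Python) =====
-- def convert_path_to_lowercase(path):
--     """将路径转换为小写并用连字符替换空格"""
--     # '/' is untouched by lower()/replace(), and '.', '..', '' are fixed points
--     # of the transform, so no split/join is needed: one whole-string pipeline.
--     return path.lower().replace(' ', '-').replace('%20', '-')
-- ===== Notes on version B (the rewrite author's own statement) =====
-- stated objective: simpler
-- what changed: Dropped the split('/')/loop/guard/join machinery entirely: since '/' is fixed by lower() and both replaces, and '.', '..', '' are fixed points of the transform, B applies the same lower/replace pipeline once to the whole string.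
import Mathlib
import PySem

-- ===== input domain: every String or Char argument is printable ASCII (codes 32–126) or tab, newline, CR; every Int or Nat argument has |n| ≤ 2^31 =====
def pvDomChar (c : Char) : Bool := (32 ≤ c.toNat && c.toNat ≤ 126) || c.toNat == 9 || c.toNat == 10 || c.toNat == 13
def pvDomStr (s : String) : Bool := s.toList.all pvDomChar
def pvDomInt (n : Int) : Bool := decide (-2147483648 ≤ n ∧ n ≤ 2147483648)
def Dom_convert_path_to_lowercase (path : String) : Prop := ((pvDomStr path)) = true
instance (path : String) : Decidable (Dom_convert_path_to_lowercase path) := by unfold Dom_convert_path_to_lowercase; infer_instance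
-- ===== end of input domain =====

-- B removes the split('/')/loop/join: '/' and the guard segments '.', '..', '' are fixed by the
-- transform, so one whole-string lower/replace pipeline gives the same value (objective: simpler).

-- ===== PORT A =====
-- path.split('/') ( '/' ≠ '' so split? is always some; none branch is unreachable )
def convert_path_to_lowercase (path : String) : String :=
  match PySem.Str.split? path "/" with
  | none => ""
  | some parts =>
    let converted_parts := parts.foldl (fun acc part =>
      if part ∈ ([".", "..", ""] : List String) then
        acc ++ [part]
      else
        acc ++ [PySem.Str.replace (PySem.Str.replace (PySem.Str.lower part) " " "-") "%20" "-"]) []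
    PySem.Str.join "/" converted_parts

-- ===== PORT B =====
def convert_path_to_lowercase_alt (path : String) : String :=
  PySem.Str.replace (PySem.Str.replace (PySem.Str.lower path) " " "-") "%20" "-"

-- ===== PRECONDITION & SPEC =====
def Spec_convert_path_to_lowercase (path : String) (out : String) : Prop := out = convert_path_to_lowercase_alt path
instance (path : String) (out : String) : Decidable (Spec_convert_path_to_lowercase path out) := by unfold Spec_convert_path_to_lowercase; infer_instance

-- ===== CLAIM (what is proved, stated in full; the proofs are below) =====
def Claim_equal_convert_path_to_lowercase : Prop := ∀ (path : String), Dom_convert_path_to_lowercase path → Spec_convert_path_to_lowercase path (convert_path_to_lowercase path)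

-- ===== LEMMAS AND PROOFS =====

-- fC: the whole-string character-level transform both programs apply to a segment/the path
def pvF (cs : List Char) : List Char :=
  PySem.Chars.replace (PySem.Chars.replace (PySem.Chars.lower cs) [' '] ['-']) ['%', '2', '0'] ['-']

-- structural (fuel-free) form of PySem.Chars.replace for a nonempty pattern
def pvRepl (o : Char) (os new : List Char) : List Char → List Char
  | [] => []
  | c :: t =>
    if (o :: os).isPrefixOf (c :: t) then new ++ pvRepl o os new (t.drop os.length)
    else c :: pvRepl o os new t
termination_by l => l.length
decreasing_by
  all_goals simp

theorem pvRepl_go (o : Char) (os new : List Char) :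
    ∀ (fuel : Nat) (l acc : List Char), l.length ≤ fuel →
      PySem.Chars.replace.go (o :: os) new fuel l acc = acc.reverse ++ pvRepl o os new l := by
  intro fuel
  induction fuel with
  | zero =>
    intro l acc h
    have : l = [] := List.eq_nil_of_length_eq_zero (Nat.le_zero.mp h)
    subst this
    simp [PySem.Chars.replace.go, pvRepl]
  | succ n ih =>
    intro l acc h
    cases l with
    | nil => simp [PySem.Chars.replace.go, pvRepl]
    | cons c t =>
      rw [PySem.Chars.replace.go]
      by_cases hp : (o :: os).isPrefixOf (c :: t)
      · rw [if_pos hp, pvRepl, if_pos hp]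
        have hlen : (t.drop os.length).length ≤ n := by
          simp at h ⊢; omega
        rw [show (c :: t).drop (o :: os).length = t.drop os.length by simp]
        rw [ih _ _ hlen]
        simp
      · rw [if_neg hp, pvRepl, if_neg hp]
        have hlen : t.length ≤ n := by simp at h; omega
        rw [ih _ _ hlen]
        simp

theorem pvReplace_eq (o : Char) (os new cs : List Char) :
    PySem.Chars.replace cs (o :: os) new = pvRepl o os new cs := by
  simp [PySem.Chars.replace]
  simpa using pvRepl_go o os new cs.length cs [] le_rfl

-- a pattern not containing '/' never matches across a '/', so replace is segment-local
theorem pvRepl_sep (o : Char) (os new : List Char) (hsep : '/' ∉ o :: os) :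
    ∀ (n : Nat) (a b : List Char), a.length ≤ n →
      pvRepl o os new (a ++ '/' :: b) = pvRepl o os new a ++ '/' :: pvRepl o os new b := by
  intro n
  induction n with
  | zero =>
    intro a b h
    have : a = [] := List.eq_nil_of_length_eq_zero (Nat.le_zero.mp h)
    subst this
    have ho : o ≠ '/' := by intro h'; exact hsep (by simp [h'])
    simp [pvRepl, List.isPrefixOf_cons₂]
    intro h'
    exact absurd h' ho
  | succ n ih =>
    intro a b h
    cases a with
    | nil =>
      have ho : o ≠ '/' := by intro h'; exact hsep (by simp [h'])
      simp [pvRepl, List.isPrefixOf_cons₂]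
      intro h'
      exact absurd h' ho
    | cons c t =>
      by_cases hbig : (o :: os).isPrefixOf (c :: (t ++ '/' :: b))
      · -- the match lies entirely inside the segment
        have hco : o = c := by
          have := (List.isPrefixOf_iff_prefix.mp hbig)
          rcases this with ⟨r, hr⟩
          exact (by simpa using congrArg (fun l => l.headD ' ') hr.symm : c = o).symm
        have hos : os <+: t ++ '/' :: b := by
          have := List.isPrefixOf_iff_prefix.mp hbig
          rw [← hco] at this
          exact (List.cons_prefix_cons.mp this).2
        have hlen : os.length ≤ t.length := by
          by_contra hgt
          rw [Nat.not_le] at hgt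
          rcases hos with ⟨r, hr⟩
          have hlt : t.length < os.length := hgt
          have hget : os[t.length]'hlt = '/' := by
            have h1 : (os ++ r)[t.length]'(by simp; omega) = os[t.length]'hlt :=
              List.getElem_append_left hlt
            have h2 : (t ++ '/' :: b)[t.length]'(by simp) = '/' := by
              simp [List.getElem_append_right (le_refl t.length)]
            rw [← h1]
            simp only [hr]
            exact h2
          exact hsep (List.mem_cons_of_mem _ (hget ▸ List.getElem_mem _))
        have host : os <+: t := by
          have h1 : os = (t ++ '/' :: b).take os.length := List.prefix_iff_eq_take.mp hos
          rw [List.take_append_of_le_length hlen] at h1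
          exact h1 ▸ List.take_prefix _ _
        have hsmall : (o :: os).isPrefixOf (c :: t) := by
          rw [List.isPrefixOf_iff_prefix, hco]
          exact List.cons_prefix_cons.mpr ⟨rfl, host⟩
        rw [show (c :: t) ++ '/' :: b = c :: (t ++ '/' :: b) by simp]
        rw [pvRepl, if_pos hbig, pvRepl, if_pos hsmall]
        rw [List.drop_append_of_le_length hlen]
        have hdlen : (t.drop os.length).length ≤ n := by simp at h ⊢; omega
        rw [ih _ _ hdlen]
        simp
      · have hsmall : ¬ (o :: os).isPrefixOf (c :: t) := by
          intro hp
          apply hbig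
          rw [List.isPrefixOf_iff_prefix] at hp ⊢
          exact hp.trans (by simp)
        rw [show (c :: t) ++ '/' :: b = c :: (t ++ '/' :: b) by simp]
        rw [pvRepl, if_neg hbig, pvRepl, if_neg hsmall]
        have hlen : t.length ≤ n := by simp at h; omega
        rw [ih _ _ hlen]
        simp

-- the whole transform is segment-local: '/' is fixed by lower and by both replaces
theorem pvF_sep (a b : List Char) : pvF (a ++ '/' :: b) = pvF a ++ '/' :: pvF b := by
  unfold pvF
  simp only [pvReplace_eq]
  have h1 : PySem.Chars.lower (a ++ '/' :: b) = PySem.Chars.lower a ++ '/' :: PySem.Chars.lower b := by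
    have hc : PySem.Chars.lowerChar '/' = '/' := by decide
    simp [PySem.Chars.lower, hc]
  rw [h1]
  rw [pvRepl_sep ' ' [] ['-'] (by decide) (PySem.Chars.lower a).length _ _ le_rfl]
  rw [pvRepl_sep '%' ['2', '0'] ['-'] (by decide) _ _ _ le_rfl]

-- structural (fuel-free) form of PySem.Chars.splitOn on a single-character separator
def pvSp (c : Char) : List Char → List (List Char)
  | [] => [[]]
  | x :: t =>
    if x = c then [] :: pvSp c t
    else
      match pvSp c t with
      | [] => [[x]]
      | h :: r => (x :: h) :: r

def pvConsHead (p : List Char) : List (List Char) → List (List Char)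
  | [] => [p]
  | h :: r => (p ++ h) :: r

theorem pvSp_ne_nil (c : Char) (cs : List Char) : pvSp c cs ≠ [] := by
  cases cs with
  | nil => simp [pvSp]
  | cons x t =>
    rw [pvSp]
    split
    · simp
    · split <;> simp

theorem pvConsHead_of_ne_nil (m : List (List Char)) (h : m ≠ []) : pvConsHead [] m = m := by
  cases m with
  | nil => exact absurd rfl h
  | cons x r => simp [pvConsHead]

theorem pvSp_go (c : Char) :
    ∀ (fuel : Nat) (l cur : List Char) (accs : List (List Char)), l.length ≤ fuel →
      PySem.Chars.splitOn.go [c] fuel l cur accs = accs.reverse ++ pvConsHead cur.reverse (pvSp c l) := by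
  intro fuel
  induction fuel with
  | zero =>
    intro l cur accs h
    have : l = [] := List.eq_nil_of_length_eq_zero (Nat.le_zero.mp h)
    subst this
    simp [PySem.Chars.splitOn.go, pvSp, pvConsHead]
  | succ n ih =>
    intro l cur accs h
    cases l with
    | nil => simp [PySem.Chars.splitOn.go, pvSp, pvConsHead]
    | cons x rest =>
      rw [PySem.Chars.splitOn.go]
      by_cases hx : x = c
      · have hp : ([c]).isPrefixOf (x :: rest) := by simp [hx]
        rw [if_pos hp]
        have hlen : ((x :: rest).drop ([c]).length).length ≤ n := by simp at h ⊢; omega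
        rw [ih _ _ _ hlen]
        rw [pvSp, if_pos hx]
        obtain ⟨h0, r, hsp⟩ := List.exists_cons_of_ne_nil (pvSp_ne_nil c rest)
        rw [hsp]
        simp [pvConsHead, hsp]
      · have hp : ¬ ([c]).isPrefixOf (x :: rest) := by
          simp [List.isPrefixOf_cons₂]
          intro h'
          exact absurd h'.symm hx
        rw [if_neg hp]
        have hlen : rest.length ≤ n := by simp at h; omega
        rw [ih _ _ _ hlen]
        rw [pvSp, if_neg hx]
        obtain ⟨h0, r, hsp⟩ := List.exists_cons_of_ne_nil (pvSp_ne_nil c rest)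
        rw [hsp]
        simp [pvConsHead]

theorem pvSplitOn_eq (c : Char) (cs : List Char) :
    PySem.Chars.splitOn cs [c] = pvSp c cs := by
  have := pvSp_go c (cs.length + 1) cs [] [] (by omega)
  simpa [PySem.Chars.splitOn, pvConsHead_of_ne_nil _ (pvSp_ne_nil c cs)] using this

theorem pvSp_no_sep (c : Char) (cs : List Char) (h : c ∉ cs) : pvSp c cs = [cs] := by
  induction cs with
  | nil => rfl
  | cons x t ih =>
    have hx : x ≠ c := fun h' => h (by simp [h'])
    have ht : c ∉ t := fun h' => h (List.mem_cons_of_mem _ h')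
    rw [pvSp, if_neg hx, ih ht]

theorem pvSp_append (c : Char) (a b : List Char) (h : c ∉ a) :
    pvSp c (a ++ c :: b) = a :: pvSp c b := by
  induction a with
  | nil => simp [pvSp]
  | cons x t ih =>
    have hx : x ≠ c := fun h' => h (by simp [h'])
    have ht : c ∉ t := fun h' => h (List.mem_cons_of_mem _ h')
    rw [List.cons_append, pvSp, if_neg hx, ih ht]

theorem pvFirst_occ (c : Char) (cs : List Char) (h : c ∈ cs) :
    ∃ a b, cs = a ++ c :: b ∧ c ∉ a := by
  induction cs with
  | nil => simp at h
  | cons x t ih =>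
    by_cases hx : x = c
    · exact ⟨[], t, by simp [hx], by simp⟩
    · have ht : c ∈ t := by (rcases List.mem_cons.mp h with h' | h'; exacts [absurd h'.symm hx, h'])
      rcases ih ht with ⟨a, b, hab, hna⟩
      exact ⟨x :: a, b, by simp [hab], by simp [hna]; exact fun h' => hx h'.symm⟩

-- main character-level fact: join('/', map f (split('/'))) = f
theorem pvMainAux : ∀ (n : Nat) (cs : List Char), cs.length ≤ n →
    PySem.Chars.join ['/'] ((pvSp '/' cs).map pvF) = pvF cs := by
  intro n
  induction n with
  | zero =>
    intro cs h
    have : cs = [] := List.eq_nil_of_length_eq_zero (Nat.le_zero.mp h)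
    subst this
    decide
  | succ n ih =>
    intro cs h
    by_cases hmem : '/' ∈ cs
    · obtain ⟨a, b, hab, hna⟩ := pvFirst_occ '/' cs hmem
      subst hab
      rw [pvSp_append _ _ _ hna]
      obtain ⟨h0, r, hsp⟩ := List.exists_cons_of_ne_nil (pvSp_ne_nil '/' b)
      rw [hsp, List.map_cons, List.map_cons, PySem.Chars.join_cons_cons,
          ← List.map_cons, ← hsp]
      have hb : b.length ≤ n := by simp at h; omega
      rw [ih b hb, pvF_sep]
      simp
    · rw [pvSp_no_sep _ _ hmem]
      simp [PySem.Chars.join_singleton]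

theorem pvMain (cs : List Char) :
    PySem.Chars.join ['/'] ((pvSp '/' cs).map pvF) = pvF cs :=
  pvMainAux cs.length cs le_rfl


-- ===== VERDICT (by name: the statement is the Claim_ definition above) =====
theorem pvStringExt {s t : String} (h : s.toList = t.toList) : s = t := by
  exact String.toList_inj.mp h

-- pointwise: the per-segment transform of A equals pvF on toList, guard branch included
theorem pvSeg (p : String) :
    (if p ∈ ([".", "..", ""] : List String) then p
     else PySem.Str.replace (PySem.Str.replace (PySem.Str.lower p) " " "-") "%20" "-").toList
      = pvF p.toList := by
  by_cases hp : p ∈ ([".", "..", ""] : List String)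
  · rw [if_pos hp]
    have hp' : p = "." ∨ p = ".." ∨ p = "" := by simpa using hp
    rcases hp' with rfl | rfl | rfl <;> decide
  · rw [if_neg hp]
    simp [pvF, PySem.Str.toList_replace, PySem.Str.toList_lower]

theorem convert_path_to_lowercase_spec : Claim_equal_convert_path_to_lowercase := by
  intro path _
  unfold Spec_convert_path_to_lowercase convert_path_to_lowercase convert_path_to_lowercase_alt
  have h2 : PySem.Chars.split? path.toList ['/'] = some (PySem.Chars.splitOn path.toList ['/']) := by
    simp [PySem.Chars.split?]
  have h := PySem.Str.split?_map path "/"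
  cases hq : PySem.Str.split? path "/" with
  | none => rw [hq] at h; rw [show ("/" : String).toList = ['/'] from rfl, h2] at h; simp at h
  | some parts =>
    rw [hq] at h
    rw [show ("/" : String).toList = ['/'] from rfl, h2] at h
    simp only [Option.map_some, Option.some.injEq] at h
    -- the loop appends one element per part: it is a map
    have hfold : parts.foldl (fun acc part =>
        if part ∈ ([".", "..", ""] : List String) then acc ++ [part]
        else acc ++ [PySem.Str.replace (PySem.Str.replace (PySem.Str.lower part) " " "-") "%20" "-"]) []
        = parts.map (fun part =>
            if part ∈ ([".", "..", ""] : List String) then part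
            else PySem.Str.replace (PySem.Str.replace (PySem.Str.lower part) " " "-") "%20" "-") := by
      rw [show (fun (acc : List String) part =>
          if part ∈ ([".", "..", ""] : List String) then acc ++ [part]
          else acc ++ [PySem.Str.replace (PySem.Str.replace (PySem.Str.lower part) " " "-") "%20" "-"])
        = (fun (acc : List String) part => acc ++ [if part ∈ ([".", "..", ""] : List String) then part
            else PySem.Str.replace (PySem.Str.replace (PySem.Str.lower part) " " "-") "%20" "-"]) from by
          funext acc part; split <;> rfl]
      simpa using PySem.List.foldl_append_singleton_eq_map (fun part =>
          if part ∈ ([".", "..", ""] : List String) then part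
          else PySem.Str.replace (PySem.Str.replace (PySem.Str.lower part) " " "-") "%20" "-") parts []
    simp only [hfold]
    -- compare character lists
    apply pvStringExt
    rw [PySem.Str.toList_join, show ("/" : String).toList = ['/'] from rfl]
    rw [List.map_map]
    rw [show (String.toList ∘ fun part =>
          if part ∈ ([".", "..", ""] : List String) then part
          else PySem.Str.replace (PySem.Str.replace (PySem.Str.lower part) " " "-") "%20" "-")
        = (fun part => pvF part.toList) from funext fun p => pvSeg p]
    rw [show (fun (part : String) => pvF part.toList) = pvF ∘ String.toList from rfl, ← List.map_map]
    rw [h, pvSplitOn_eq, pvMain]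
    simp [pvF, PySem.Str.toList_replace, PySem.Str.toList_lower]
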